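-- pv_equiv track=rewrite | github.com/daniel-reich/ubiquitous-fiesta | kiX7WjSFeTmBYcEgK_0.py | major_sum
-- ===== SOURCE A (Python) =====
-- def major_sum(lst):
--   pos, neg, zero = 0, 0, 0
--   for n in lst:
--     if n > 0:
--       pos += n
--     elif n < 0:
--       neg += n
--     else:
--       zero += 1
--   return max(pos, neg, zero, key=abs)
-- ===== SOURCE B (Python) =====
-- def major_sum(lst):
--   s = sorted(lst)
--   neg, lo = 0, 0
--   while lo < len(s) and s[lo] < 0:
--     neg += s[lo]
--     lo += 1
--   pos, hi = 0, len(s)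
--   while hi > lo and s[hi - 1] > 0:
--     pos += s[hi - 1]
--     hi -= 1
--   zero = hi - lo
--   m = neg if abs(neg) > abs(pos) else pos
--   return zero if abs(zero) > abs(m) else m
-- ===== Notes on version B (the rewrite author's own statement) =====
-- stated objective: alternative
-- what changed: Instead of classifying each element in one pass, B sorts the list and scans inward from both ends: the negative prefix is summed left-to-right, the positive suffix right-to-left, and the zero count is just the width of the untouched middle segment; the max-by-abs selection is kept.
import Mathlib
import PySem

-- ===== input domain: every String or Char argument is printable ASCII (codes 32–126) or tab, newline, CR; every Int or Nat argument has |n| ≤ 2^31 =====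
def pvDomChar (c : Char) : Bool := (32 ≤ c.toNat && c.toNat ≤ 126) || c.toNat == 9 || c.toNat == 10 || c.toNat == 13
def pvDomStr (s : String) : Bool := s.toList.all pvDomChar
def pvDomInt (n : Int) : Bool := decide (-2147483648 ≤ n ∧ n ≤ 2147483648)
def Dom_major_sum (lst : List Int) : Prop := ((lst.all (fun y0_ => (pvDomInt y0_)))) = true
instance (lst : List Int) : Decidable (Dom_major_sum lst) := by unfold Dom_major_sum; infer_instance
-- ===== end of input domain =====

-- B replaces A's single classifying pass by sort + two inward end scans (alternative algorithm; not faster).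

-- ===== PORT A =====
-- max(pos, neg, zero, key=abs): Python keeps the first argument with maximal key,
-- replacing the current best only on a strictly greater key.
def major_sum (lst : List Int) : Int :=
  let s := lst.foldl (fun (st : Int × Int × Int) n =>
    if n > 0 then (st.1 + n, st.2.1, st.2.2)
    else if n < 0 then (st.1, st.2.1 + n, st.2.2)
    else (st.1, st.2.1, st.2.2 + 1)) (0, 0, 0)
  let m := if |s.2.1| > |s.1| then s.2.1 else s.1
  if |s.2.2| > |m| then s.2.2 else m

-- ===== PORT B =====
-- first while loop: sum the negative prefix of the sorted list, advancing lo
def negLoop (s : List Int) (neg : Int) (lo : Nat) : Int × Nat :=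
  if lo < s.length then
    if s.getD lo 0 < 0 then negLoop s (neg + s.getD lo 0) (lo + 1) else (neg, lo)
  else (neg, lo)
termination_by s.length - lo

-- second while loop: sum the positive suffix, moving hi down (getD totalizes s[hi-1])
def posLoop (s : List Int) (lo : Nat) (pos : Int) (hi : Nat) : Int × Nat :=
  if lo < hi then
    if s.getD (hi - 1) 0 > 0 then posLoop s lo (pos + s.getD (hi - 1) 0) (hi - 1) else (pos, hi)
  else (pos, hi)
termination_by hi

def major_sum_alt (lst : List Int) : Int :=
  let s := PySem.List.sorted lst (fun x => x) false
  let r1 := negLoop s 0 0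
  let r2 := posLoop s r1.2 0 s.length
  let zero : Int := (r2.2 : Int) - (r1.2 : Int)
  let m := if |r1.1| > |r2.1| then r1.1 else r2.1
  if |zero| > |m| then zero else m

-- ===== PRECONDITION & SPEC =====
def Spec_major_sum (lst : List Int) (out : Int) : Prop := out = major_sum_alt lst
instance (lst : List Int) (out : Int) : Decidable (Spec_major_sum lst out) := by unfold Spec_major_sum; infer_instance

-- ===== CLAIM =====
def Claim_equal_major_sum : Prop := ∀ (lst : List Int), Dom_major_sum lst → Spec_major_sum lst (major_sum lst)

-- ===== LEMMAS AND PROOFS =====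

theorem major_sum_fold_eq (lst : List Int) (p n z : Int) :
    lst.foldl (fun (st : Int × Int × Int) n =>
      if n > 0 then (st.1 + n, st.2.1, st.2.2)
      else if n < 0 then (st.1, st.2.1 + n, st.2.2)
      else (st.1, st.2.1, st.2.2 + 1)) (p, n, z)
    = (p + (lst.filter (fun n => decide (n > 0))).sum,
       n + (lst.filter (fun n => decide (n < 0))).sum,
       z + ((lst.filter (fun n => decide (n = 0))).length : Int)) := by
  induction lst generalizing p n z with
  | nil => simp
  | cons x xs ih =>
    simp only [List.foldl_cons]
    by_cases h1 : x > 0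
    · rw [if_pos h1, ih]
      simp [h1, (show ¬x < 0 by omega), (show ¬x = 0 by omega)]
      ring
    · by_cases h2 : x < 0
      · rw [if_neg h1, if_pos h2, ih]
        simp [h1, h2, (show ¬x = 0 by omega)]
        ring
      · rw [if_neg h1, if_neg h2, ih]
        simp [(show x = 0 by omega)]
        ring

-- a ≤-sorted list splits as (negatives ++ zeros ++ positives), each block a filter
theorem sorted_split (s : List Int) (hs : s.Pairwise (fun a b => a ≤ b)) :
    s = s.filter (fun x => decide (x < 0)) ++ s.filter (fun x => decide (x = 0))
        ++ s.filter (fun x => decide (x > 0)) := by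
  induction s with
  | nil => simp
  | cons x xs ih =>
    rcases List.pairwise_cons.mp hs with ⟨hx, hxs⟩
    have ihe := ih hxs
    by_cases h1 : x < 0
    · simp only [List.filter_cons, h1, decide_true, (show decide (x = 0) = false by simp; omega), (show decide (x > 0) = false by simp; omega)]
      simpa [List.append_assoc] using ihe
    · by_cases h2 : x = 0
      · have hn : xs.filter (fun x => decide (x < 0)) = [] := by
          rw [List.filter_eq_nil_iff]
          intro y hy; have := hx y hy; simp; omega
        simp only [List.filter_cons, h2, decide_true, hn] at ihe ⊢
        simpa [List.append_assoc] using ihe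
      · have hpos : ∀ y ∈ xs, ¬ y < 0 ∧ ¬ y = 0 := by
          intro y hy; have := hx y hy; omega
        have hn : xs.filter (fun x => decide (x < 0)) = [] := by
          rw [List.filter_eq_nil_iff]; intro y hy; simpa using (hpos y hy).1
        have hz : xs.filter (fun x => decide (x = 0)) = [] := by
          rw [List.filter_eq_nil_iff]; intro y hy; simpa using (hpos y hy).2
        simp only [List.filter_cons, (show decide (x > 0) = true by simp; omega), (show decide (x < 0) = false by simp; omega), (show decide (x = 0) = false by simp; omega), hn, hz] at ihe ⊢
        simpa [List.append_assoc] using ihe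

-- negLoop characterised on a list whose negative prefix is N
theorem negLoop_spec (N rest : List Int) (hN : ∀ x ∈ N, x < 0)
    (hrest : ∀ y (_ : rest = y :: rest.tail), ¬ y < 0) :
    ∀ (pre : List Int) (neg : Int), (∀ x ∈ pre, True) →
      negLoop (pre ++ N ++ rest) neg pre.length = (neg + N.sum, pre.length + N.length) := by
  induction N with
  | nil =>
    intro pre neg _
    rw [negLoop]
    cases hr : rest with
    | nil => simp
    | cons y t =>
      have hy : ¬ y < 0 := by
        apply hrest (y := y); rw [hr]; rfl
      have hlen : pre.length < (pre ++ [] ++ y :: t).length := by simp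
      rw [if_pos hlen]
      have hget : (pre ++ [] ++ y :: t).getD pre.length 0 = y := by
        rw [List.getD_eq_getElem?_getD, List.append_assoc, List.getElem?_append_right (by simp)]
        simp
      rw [hget, if_neg hy]
      simp
  | cons a N' ih =>
    intro pre neg _
    rw [negLoop]
    have ha : a < 0 := hN a (by simp)
    have hlen : pre.length < (pre ++ (a :: N') ++ rest).length := by simp
    rw [if_pos hlen]
    have hget : (pre ++ (a :: N') ++ rest).getD pre.length 0 = a := by
      rw [List.getD_eq_getElem?_getD, List.append_assoc, List.getElem?_append_right (by simp)]
      simp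
    rw [hget, if_pos ha]
    have hassoc : pre ++ (a :: N') ++ rest = (pre ++ [a]) ++ N' ++ rest := by simp
    have hlen2 : pre.length + 1 = (pre ++ [a]).length := by simp
    rw [hassoc, hlen2, ih (fun x hx => hN x (by simp [hx])) (pre ++ [a]) (neg + a) (fun _ _ => trivial)]
    simp; constructor
    · ring
    · omega

-- posLoop characterised: M is the non-positive left part (beyond index lo), P the positive tail
theorem posLoop_spec (P : List Int) (hP : ∀ x ∈ P, x > 0) :
    ∀ (M junk : List Int) (lo : Nat) (pos : Int), (∀ x ∈ M, ¬ x > 0) → lo ≤ M.length →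
      posLoop (M ++ P ++ junk) lo pos (M ++ P).length = (pos + P.sum, M.length) := by
  induction P using List.reverseRecOn with
  | nil =>
    intro M junk lo pos hM hlo
    simp only [List.append_nil]
    rw [posLoop]
    by_cases h : lo < M.length
    · rw [if_pos h]
      have hlt : M.length - 1 < M.length := by omega
      have hget : (M ++ junk).getD (M.length - 1) 0 = M[M.length - 1]'hlt := by
        rw [List.getD_eq_getElem?_getD, List.getElem?_append_left hlt,
          List.getElem?_eq_getElem hlt]
        rfl
      rw [hget, if_neg (hM _ (List.getElem_mem _))]
      simp
    · rw [if_neg h]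
      simp
  | append_singleton P' a ih =>
    intro M junk lo pos hM hlo
    have ha : a > 0 := hP a (by simp)
    rw [posLoop]
    have hlen : lo < (M ++ (P' ++ [a])).length := by simp; omega
    rw [if_pos hlen]
    have hidx : (M ++ (P' ++ [a])).length - 1 = (M ++ P').length := by simp
    have hget : (M ++ (P' ++ [a]) ++ junk).getD ((M ++ (P' ++ [a])).length - 1) 0 = a := by
      rw [hidx]
      have : M ++ (P' ++ [a]) ++ junk = (M ++ P') ++ ([a] ++ junk) := by simp
      rw [this, List.getD_eq_getElem?_getD, List.getElem?_append_right (le_refl _)]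
      simp
    rw [hget, if_pos ha]
    have hre : M ++ (P' ++ [a]) ++ junk = M ++ P' ++ ([a] ++ junk) := by simp
    rw [hre, hidx, ih (fun x hx => hP x (by simp [hx])) M ([a] ++ junk) lo (pos + a) hM hlo]
    simp; ring

-- ===== VERDICT =====
theorem major_sum_spec : Claim_equal_major_sum := by
  intro lst _
  unfold Spec_major_sum major_sum major_sum_alt
  dsimp only
  rw [major_sum_fold_eq]
  set s := PySem.List.sorted lst (fun x => x) false with hsdef
  have hperm : s.Perm lst := PySem.List.sorted_perm lst (fun x => x) false
  have hpair : s.Pairwise (fun a b => a ≤ b) := by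
    have := PySem.List.sorted_pairwise lst (fun x => x)
    simpa using this
  set N := s.filter (fun x => decide (x < 0)) with hN
  set Z := s.filter (fun x => decide (x = 0)) with hZ
  set P := s.filter (fun x => decide (x > 0)) with hP
  have hsplit : s = N ++ Z ++ P := sorted_split s hpair
  have hNmem : ∀ x ∈ N, x < 0 := by intro x hx; rw [hN] at hx; simpa using (List.of_mem_filter hx)
  have hZmem : ∀ x ∈ Z, x = 0 := by intro x hx; rw [hZ] at hx; simpa using (List.of_mem_filter hx)
  have hPmem : ∀ x ∈ P, x > 0 := by intro x hx; rw [hP] at hx; simpa using (List.of_mem_filter hx)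
  -- first loop
  have hneg : negLoop s 0 0 = (N.sum, N.length) := by
    have hrest : ∀ y (_ : (Z ++ P) = y :: (Z ++ P).tail), ¬ y < 0 := by
      intro y hy
      have hmem : y ∈ Z ++ P := by rw [hy]; simp
      rcases List.mem_append.mp hmem with h | h
      · have := hZmem y h; omega
      · have := hPmem y h; omega
    have := negLoop_spec N (Z ++ P) hNmem hrest [] 0 (fun _ _ => trivial)
    simp at this
    rw [hsplit, List.append_assoc]
    simpa using this
  -- second loop
  have hpos : posLoop s N.length 0 s.length = (P.sum, N.length + Z.length) := by
    have hMmem : ∀ x ∈ N ++ Z, ¬ x > 0 := by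
      intro x hx
      rcases List.mem_append.mp hx with h | h
      · have := hNmem x h; omega
      · have := hZmem x h; omega
    have hsp := posLoop_spec P hPmem (N ++ Z) [] N.length 0 hMmem (by simp)
    rw [List.append_nil] at hsp
    rw [hsplit, hsp]
    simp
  rw [hneg, hpos]
  -- translate filtered sums/lengths over the permutation
  have hsum_neg : N.sum = (lst.filter (fun n => decide (n < 0))).sum :=
    (hperm.filter _).sum_eq
  have hsum_pos : P.sum = (lst.filter (fun n => decide (n > 0))).sum :=
    (hperm.filter _).sum_eq
  have hlen_z : Z.length = (lst.filter (fun n => decide (n = 0))).length :=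
    (hperm.filter _).length_eq
  simp only [hsum_neg, hsum_pos]
  have hz : ((N.length + Z.length : Nat) : Int) - (N.length : Int)
      = ((lst.filter (fun n => decide (n = 0))).length : Int) := by
    rw [← hlen_z]; push_cast; ring
  rw [hz]
  simp
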